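-- pv_equiv track=rewrite | github.com/jurgyy/Advent-of-Code-2021 | day10/main.py | get_completion_points
-- ===== SOURCE A (Python) =====
-- from typing import List, Iterable, Tuple
--
-- def get_completion_points(missing: List[str]) -> int:
--     score_dict = {
--         ")": 1,
--         "]": 2,
--         "}": 3,
--         ">": 4,
--     }
--
--     score = 0
--     for m in missing:
--         score = score * 5 + score_dict[m]
--     return score
-- ===== SOURCE B (Python) =====
-- def get_completion_points(missing):
--     score_dict = {
--         ")": 1,
--         "]": 2,
--         "}": 3,
--         ">": 4,
--     }
--     total = 0
--     power = 1
--     for m in reversed(missing):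
--         total += score_dict[m] * power
--         power *= 5
--     return total
-- ===== Notes on version B (the rewrite author's own statement) =====
-- stated objective: alternative
-- what changed: Replaces the left-to-right Horner fold (score = score*5 + points) with a right-to-left place-value sum: iterate over reversed(missing) keeping an explicit power-of-5 multiplier and accumulate points*power.
import Mathlib
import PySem

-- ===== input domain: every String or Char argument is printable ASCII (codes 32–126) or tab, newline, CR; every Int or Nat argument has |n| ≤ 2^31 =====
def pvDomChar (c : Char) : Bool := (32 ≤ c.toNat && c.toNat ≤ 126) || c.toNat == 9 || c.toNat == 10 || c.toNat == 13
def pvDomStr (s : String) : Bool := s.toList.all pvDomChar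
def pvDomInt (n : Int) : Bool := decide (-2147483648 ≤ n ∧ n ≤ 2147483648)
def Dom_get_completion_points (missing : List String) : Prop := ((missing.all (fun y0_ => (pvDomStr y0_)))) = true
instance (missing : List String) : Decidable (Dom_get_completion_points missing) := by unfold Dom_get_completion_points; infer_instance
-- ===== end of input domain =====

-- B computes the completion score as a right-to-left place-value sum with an explicit
-- power-of-5 multiplier instead of A's left-to-right Horner fold (alternative decomposition).


-- ===== PORT A =====
-- score_dict of A (KeyError on other strings is excluded by Pre_, so getD's default is never used inside Pre_)
def pvScoreDictA : PySem.Dict String Int :=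
  PySem.Dict.ofList [(")", 1), ("]", 2), ("}", 3), (">", 4)]

def get_completion_points (missing : List String) : Int :=
  missing.foldl (fun score m => score * 5 + pvScoreDictA.getD m 0) 0

-- ===== PORT B =====
def pvScoreDictB : PySem.Dict String Int :=
  PySem.Dict.ofList [(")", 1), ("]", 2), ("}", 3), (">", 4)]

-- the reversed loop of B: state (total, power)
def pvAltGo : List String → Int → Int → Int
  | [], total, _ => total
  | m :: rest, total, power => pvAltGo rest (total + pvScoreDictB.getD m 0 * power) (power * 5)

def get_completion_points_alt (missing : List String) : Int :=
  pvAltGo missing.reverse 0 1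

-- ===== PRECONDITION & SPEC =====
-- Pre_ excludes inputs containing a string other than the four closing brackets,
-- on which the Python (both A and B) raises KeyError.
def Pre_get_completion_points (missing : List String) : Prop :=
  ∀ m ∈ missing, m ∈ [")", "]", "}", ">"]
instance (missing : List String) : Decidable (Pre_get_completion_points missing) := by
  unfold Pre_get_completion_points; infer_instance

def pvWitness_get_completion_points : List String := ["}", "}", "]", "]", ")", "}", ")", "]"]

def Spec_get_completion_points (missing : List String) (out : Int) : Prop := out = get_completion_points_alt missing
instance (missing : List String) (out : Int) : Decidable (Spec_get_completion_points missing out) := by unfold Spec_get_completion_points; infer_instance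

-- ===== CLAIM (what is proved, stated in full; the proofs are below) =====
def Claim_equal_get_completion_points : Prop := ∀ (missing : List String), Dom_get_completion_points missing → Pre_get_completion_points missing → Spec_get_completion_points missing (get_completion_points missing)

-- ===== LEMMAS AND PROOFS =====

theorem pvAltGo_eq (l : List String) : ∀ (t p : Int),
    pvAltGo l t p = t + p * (l.reverse.foldl (fun score m => score * 5 + pvScoreDictA.getD m 0) 0) := by
  induction l with
  | nil => intro t p; simp [pvAltGo]
  | cons m rest ih =>
      intro t p
      simp only [pvAltGo, ih, List.reverse_cons, List.foldl_append, List.foldl]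
      have : pvScoreDictB = pvScoreDictA := rfl
      rw [this]; ring

-- ===== VERDICT (by name: the statement is the Claim_ definition above) =====
theorem get_completion_points_spec : Claim_equal_get_completion_points := by
  intro missing _ _
  unfold Spec_get_completion_points get_completion_points get_completion_points_alt
  rw [pvAltGo_eq, List.reverse_reverse]
  ring
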